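-- pv_equiv track=rewrite | github.com/LiMingML/hackerrank | algorithm/implementation/Viral Advertising.py | viralAdvertising
-- ===== SOURCE A (Python) =====
-- import math
--
-- d = {}
--
-- def viralAdvertising(n):
--     # Write your code here
--     def helper(n):
--         if n in d:
--             return d[n]
--
--         if n == 1:
--             d[n] = 2
--             return 2
--
--         fn = math.floor(helper(n - 1) * 3 / 2)
--         d[n] = fn
--         return fn
--
--     answer = 0
--     for i in range(1, n + 1):
--         answer += helper(i)
--     return answer
-- ===== SOURCE B (Python) =====
-- import math
--
-- def viralAdvertising(n):
--     answer = 0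
--     cur = 0
--     for i in range(1, n + 1):
--         cur = 2 if i == 1 else math.floor(cur * 3 / 2)
--         answer += cur
--     return answer
-- ===== Notes on version B (the rewrite author's own statement) =====
-- stated objective: simpler
-- what changed: Replaces the recursive memoizing helper plus module-level dict (each day recomputed via dict lookups) with a single forward loop carrying only a running total and the current day's share, keeping the exact math.floor(cur * 3 / 2) float expression so the values match bit for bit.
import Mathlib
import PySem

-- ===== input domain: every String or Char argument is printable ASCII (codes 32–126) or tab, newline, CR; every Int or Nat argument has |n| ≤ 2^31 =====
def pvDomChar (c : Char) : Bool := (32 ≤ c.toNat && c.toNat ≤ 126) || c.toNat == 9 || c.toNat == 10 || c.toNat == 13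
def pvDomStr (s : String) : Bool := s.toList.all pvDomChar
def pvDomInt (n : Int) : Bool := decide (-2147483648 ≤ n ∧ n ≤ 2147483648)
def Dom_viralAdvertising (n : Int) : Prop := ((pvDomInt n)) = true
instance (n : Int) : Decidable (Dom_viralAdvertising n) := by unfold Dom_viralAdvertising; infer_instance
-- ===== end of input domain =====

-- B replaces A's recursive memoizing helper + module-level dict with a single loop
-- carrying a running total and the current share (objective: simpler; return value only).

-- ===== PORT A =====
-- Shared hand port of Python's `math.floor(t / 2)` for an int t ≥ 0 (both Pythons contain
-- the exact expression `math.floor(cur * 3 / 2)`): CPython's int / int produces the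
-- correctly-rounded (round-to-nearest, ties-to-even) 53-bit double of the exact rational
-- t/2, and math.floor takes its floor.  For t < 2^53 the double is exact, so the result is
-- t // 2; otherwise the double is m * 2^(k-1) where k = bitLength t - 53 and m is t / 2^k
-- rounded to nearest (ties to even), already an integer.  Exact for 0 ≤ t < 2^1024
-- (beyond which Python raises OverflowError — excluded by Pre_ below).
def floorHalfDouble (t : Int) : Int :=
  let b := PySem.Int.bitLength t
  if b ≤ 53 then PySem.Int.floordiv t 2
  else
    let k := b - 53
    let q0 := PySem.Int.floordiv t ((2 : Int) ^ k)
    let r := t - q0 * (2 : Int) ^ k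
    let half := (2 : Int) ^ (k - 1)
    let m := if half < r then q0 + 1 else if r = half then q0 + PySem.Int.mod q0 2 else q0
    m * (2 : Int) ^ (k - 1)

-- Python's helper(n): memo lookup, base case n == 1, else recurse on n - 1.
-- helper is only ever called with n ≥ 1, so the recursion is ported on Nat
-- (the 0 branch is unreachable from viralAdvertising).
def helperA : Nat → PySem.Dict Int Int → Int × PySem.Dict Int Int
  | n, d =>
    match PySem.Dict.get? d (n : Int) with
    | some v => (v, d)
    | none =>
      match n with
      | 0 => (0, d)        -- unreachable: helper is only reached with n ≥ 1
      | 1 => (2, PySem.Dict.insert d 1 2)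
      | (m + 2) =>
        let r := helperA (m + 1) d
        let fn := floorHalfDouble (r.1 * 3)
        (fn, PySem.Dict.insert r.2 (((m + 2 : Nat) : Int)) fn)

def viralAdvertising (n : Int) : Int :=
  ((PySem.List.pyRange 1 (n + 1) 1).foldl
    (fun (st : Int × PySem.Dict Int Int) i =>
      let r := helperA i.toNat st.2
      (st.1 + r.1, r.2))
    (0, PySem.Dict.empty)).1

-- ===== PORT B =====
def viralAdvertising_alt (n : Int) : Int :=
  ((PySem.List.pyRange 1 (n + 1) 1).foldl
    (fun (st : Int × Int) i =>
      let cur := if i = 1 then 2 else floorHalfDouble (st.2 * 3)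
      (st.1 + cur, cur))
    (0, 0)).1

-- ===== PRECONDITION & SPEC =====
-- Pre_ excludes exactly the n on which Python's A raises: for n ≥ 1751 the share exceeds
-- the double range and `math.floor(cur * 3 / 2)` raises OverflowError ("integer division
-- result too large for a float") on day 1751; B contains the same expression and raises
-- there too.  A returns normally on every n ≤ 1750.
def Pre_viralAdvertising (n : Int) : Prop := n ≤ 1750
instance (n : Int) : Decidable (Pre_viralAdvertising n) := by unfold Pre_viralAdvertising; infer_instance
def pvWitness_viralAdvertising : Int := 5

def Spec_viralAdvertising (n : Int) (out : Int) : Prop := out = viralAdvertising_alt n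
instance (n : Int) (out : Int) : Decidable (Spec_viralAdvertising n out) := by unfold Spec_viralAdvertising; infer_instance

-- ===== CLAIM (what is proved, stated in full; the proofs are below) =====
def Claim_equal_viralAdvertising : Prop := ∀ (n : Int), Dom_viralAdvertising n → Pre_viralAdvertising n → Spec_viralAdvertising n (viralAdvertising n)

-- ===== LEMMAS AND PROOFS =====

-- the shared share sequence: c 0 = 0 (initial cur in B), c 1 = 2, c (k+2) = floor((3·c (k+1))/2 as double)
def shareC : Nat → Int
  | 0 => 0
  | 1 => 2
  | (k + 2) => floorHalfDouble (shareC (k + 1) * 3)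

-- the memo dict after days 1..k have been processed
def memoD : Nat → PySem.Dict Int Int
  | 0 => PySem.Dict.empty
  | (k + 1) => PySem.Dict.insert (memoD k) (((k + 1 : Nat) : Int)) (shareC (k + 1))

theorem memoD_get? (k j : Nat) :
    PySem.Dict.get? (memoD k) (j : Int) =
      if 1 ≤ j ∧ j ≤ k then some (shareC j) else none := by
  induction k with
  | zero =>
    rw [memoD, PySem.Dict.get?_empty, if_neg (by omega)]
  | succ k ih =>
    rw [memoD, PySem.Dict.get?_insert, ih]
    by_cases h : j = k + 1
    · subst h
      rw [if_pos (by push_cast; ring), if_pos (by omega)]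
    · rw [if_neg (by exact_mod_cast h)]
      split_ifs with h1 h2 <;> first | rfl | omega

theorem helperA_hit (n : Nat) (d : PySem.Dict Int Int) (v : Int)
    (h : PySem.Dict.get? d (n : Int) = some v) : helperA n d = (v, d) := by
  rw [helperA.eq_def]
  dsimp only
  rw [h]

theorem helperA_miss2 (m : Nat) (d : PySem.Dict Int Int)
    (h : PySem.Dict.get? d (((m + 2 : Nat) : Int)) = none) :
    helperA (m + 2) d =
      (floorHalfDouble ((helperA (m + 1) d).1 * 3),
       PySem.Dict.insert (helperA (m + 1) d).2 (((m + 2 : Nat) : Int))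
         (floorHalfDouble ((helperA (m + 1) d).1 * 3))) := by
  rw [helperA.eq_def]
  dsimp only
  rw [h]

theorem helperA_memo (k : Nat) :
    helperA (k + 1) (memoD k) = (shareC (k + 1), memoD (k + 1)) := by
  cases k with
  | zero =>
    rw [helperA.eq_def]
    rfl
  | succ m =>
    have hnone : PySem.Dict.get? (memoD (m + 1)) (((m + 2 : Nat) : Int)) = none := by
      rw [memoD_get? (m + 1) (m + 2), if_neg (by omega)]
    have hhit : helperA (m + 1) (memoD (m + 1)) = (shareC (m + 1), memoD (m + 1)) :=
      helperA_hit (m + 1) (memoD (m + 1)) (shareC (m + 1))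
        (by rw [memoD_get? (m + 1) (m + 1)]; simp)
    rw [helperA_miss2 m (memoD (m + 1)) hnone, hhit]
    have hc : ((m : Int) + 1 + 1) = (m : Int) + 2 := by ring
    simp [shareC, memoD, hc]

theorem foldA_eq (m : Nat) :
    (PySem.List.pyRange 1 ((m : Int) + 1) 1).foldl
      (fun (st : Int × PySem.Dict Int Int) i =>
        let r := helperA i.toNat st.2
        (st.1 + r.1, r.2))
      (0, PySem.Dict.empty)
    = ((List.range m).foldl (fun s k => s + shareC (k + 1)) 0, memoD m) := by
  induction m with
  | zero =>
    rw [PySem.List.pyRange_one_eq_nil (by omega)]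
    simp [memoD]
  | succ m ih =>
    have : ((m + 1 : Nat) : Int) + 1 = ((m : Int) + 1) + 1 := by push_cast; ring
    rw [this, PySem.List.pyRange_one_succ_right (by omega), List.foldl_append, ih,
        List.range_succ, List.foldl_append]
    simp only [List.foldl_cons, List.foldl_nil]
    have htn : ((m : Int) + 1).toNat = m + 1 := by omega
    rw [htn, helperA_memo m]

theorem foldB_eq (m : Nat) :
    (PySem.List.pyRange 1 ((m : Int) + 1) 1).foldl
      (fun (st : Int × Int) i =>
        let cur := if i = 1 then 2 else floorHalfDouble (st.2 * 3)
        (st.1 + cur, cur))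
      (0, 0)
    = ((List.range m).foldl (fun s k => s + shareC (k + 1)) 0, shareC m) := by
  induction m with
  | zero =>
    rw [PySem.List.pyRange_one_eq_nil (by omega)]
    simp [shareC]
  | succ m ih =>
    have : ((m + 1 : Nat) : Int) + 1 = ((m : Int) + 1) + 1 := by push_cast; ring
    rw [this, PySem.List.pyRange_one_succ_right (by omega), List.foldl_append, ih,
        List.range_succ, List.foldl_append]
    simp only [List.foldl_cons, List.foldl_nil]
    cases m with
    | zero => simp [shareC]
    | succ m =>
      have hne : ((m + 1 : Nat) : Int) + 1 ≠ 1 := by omega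
      rw [if_neg hne]
      rfl

theorem viral_eq_all (n : Int) : viralAdvertising n = viralAdvertising_alt n := by
  by_cases h : n ≤ 0
  · unfold viralAdvertising viralAdvertising_alt
    rw [PySem.List.pyRange_one_eq_nil (by omega)]
    rfl
  · have hm : n = ((n.toNat : Nat) : Int) := by omega
    unfold viralAdvertising viralAdvertising_alt
    rw [hm, foldA_eq, foldB_eq]

-- ===== VERDICT (by name: the statement is the Claim_ definition above) =====
theorem viralAdvertising_spec : Claim_equal_viralAdvertising := by
  intro n _ _
  unfold Spec_viralAdvertising
  exact viral_eq_all n
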